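-- pv_equiv track=rewrite | github.com/HexmosTech/LiveReview | scripts/gitea_handler.py | find_first_added_line
-- ===== SOURCE A (Python) =====
-- from typing import Dict, List, Optional, Tuple
--
-- def find_first_added_line(patch: str) -> Optional[int]:
-- 	"""Return the first new-line number from a unified diff patch."""
--
-- 	new_line = None
-- 	old_cursor = 0
-- 	new_cursor = 0
-- 	fallback_line = None
--
-- 	for raw in patch.splitlines():
-- 		if raw.startswith("@@"):
-- 			header = raw.split("@@")[1].strip()
-- 			try:
-- 				old_chunk, new_chunk = header.split(" ")[:2]
-- 				old_start = int(old_chunk.split(",")[0][1:])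
-- 				new_start = int(new_chunk.split(",")[0][1:])
-- 				old_cursor = old_start
-- 				new_cursor = new_start
-- 				fallback_line = fallback_line or new_start
-- 			except (ValueError, IndexError):
-- 				continue
-- 			continue
--
-- 		if raw.startswith("+"):
-- 			if new_line is None:
-- 				new_line = new_cursor
-- 			new_cursor += 1
-- 		elif raw.startswith("-"):
-- 			old_cursor += 1
-- 		else:
-- 			old_cursor += 1
-- 			new_cursor += 1
--
-- 		if new_line is not None:
-- 			return new_line
--
-- 	return new_line or fallback_line
-- ===== SOURCE B (Python) =====
-- def _parse_header(raw):
--     """Parse '@@ -a,b +c,d @@' header; return new_start or None if malformed."""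
--     header = raw.split("@@")[1].strip()
--     try:
--         old_chunk, new_chunk = header.split(" ")[:2]
--         int(old_chunk.split(",")[0][1:])
--         return int(new_chunk.split(",")[0][1:])
--     except (ValueError, IndexError):
--         return None
--
--
-- def find_first_added_line(patch):
--     """Return the first new-line number from a unified diff patch.
--
--     Group-by-hunk-then-scan: split the patch into hunks (a prelude hunk
--     starting at 0, then one hunk per valid '@@' header), then scan each
--     hunk body with a local cursor until the first '+' line.
--     """
--     hunks = [(0, [])]
--     fallback = None
--     for raw in patch.splitlines():
--         if raw.startswith("@@"):
--             new_start = _parse_header(raw)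
--             if new_start is not None:
--                 hunks.append((new_start, []))
--                 fallback = fallback or new_start
--         else:
--             hunks[-1][1].append(raw)
--     for start, body in hunks:
--         cursor = start
--         for line in body:
--             if line.startswith("+"):
--                 return cursor
--             if not line.startswith("-"):
--                 cursor += 1
--     return fallback
-- ===== Notes on version B (the rewrite author's own statement) =====
-- stated objective: alternative
-- what changed: B splits the patch into hunks (a prelude hunk plus one per valid '@@' header, collecting the first-truthy-new_start fallback while grouping) and then scans each hunk body with a local cursor, instead of A's single loop threading cumulative old/new cursors and an early return through every line.
import Mathlib
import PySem

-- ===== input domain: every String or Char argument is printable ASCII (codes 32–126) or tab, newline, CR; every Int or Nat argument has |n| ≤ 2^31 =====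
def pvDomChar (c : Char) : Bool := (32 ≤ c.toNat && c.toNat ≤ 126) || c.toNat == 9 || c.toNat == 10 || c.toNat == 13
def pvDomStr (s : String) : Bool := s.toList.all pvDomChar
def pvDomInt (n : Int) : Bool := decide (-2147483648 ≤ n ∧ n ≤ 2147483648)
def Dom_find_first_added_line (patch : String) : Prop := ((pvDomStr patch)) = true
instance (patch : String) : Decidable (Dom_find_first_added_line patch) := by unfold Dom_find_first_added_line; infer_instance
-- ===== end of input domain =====

-- B regroups the patch into hunks (prelude + one per valid '@@' header) and scans each hunk
-- body with a local cursor; a different decomposition of A's single cumulative cursor loop.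


-- ===== PORT A =====

-- A's header parsing: header = raw.split("@@")[1].strip(), then the try-block;
-- none = ValueError/IndexError (the 'except ... continue' path)
def pvParseHeaderA (raw : String) : Option (Int × Int) :=
  match (PySem.Str.split? (PySem.Str.strip (((PySem.Str.split? raw "@@").getD []).getD 1 "")) " ").getD [] with
  | oldChunk :: newChunk :: _ =>
    match PySem.Int.ofStr? (PySem.Str.slice (((PySem.Str.split? oldChunk ",").getD []).getD 0 "") (some 1) none),
          PySem.Int.ofStr? (PySem.Str.slice (((PySem.Str.split? newChunk ",").getD []).getD 0 "") (some 1) none) with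
    | some os, some ns => some (os, ns)
    | _, _ => none
  | _ => none

-- Python truthiness of `x or y` on Optional[int] (0 and None are falsy)
def pvOrOpt (a b : Option Int) : Option Int :=
  match a with
  | some v => if v = 0 then b else some v
  | none => b

-- A's loop: state (new_line, old_cursor, new_cursor, fallback_line)
def pvGoA : List String → Option Int → Int → Int → Option Int → Option Int
  | [], newLine, _, _, fb => pvOrOpt newLine fb
  | raw :: rest, newLine, oldCur, newCur, fb =>
    if PySem.Str.startswith raw "@@" then
      match pvParseHeaderA raw with
      | some (os, ns) => pvGoA rest newLine os ns (pvOrOpt fb (some ns))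
      | none => pvGoA rest newLine oldCur newCur fb
    else
      let st :=
        if PySem.Str.startswith raw "+" then
          ((if newLine = none then some newCur else newLine), oldCur, newCur + 1)
        else if PySem.Str.startswith raw "-" then (newLine, oldCur + 1, newCur)
        else (newLine, oldCur + 1, newCur + 1)
      match st.1 with
      | some v => some v
      | none => pvGoA rest st.1 st.2.1 st.2.2 fb

def find_first_added_line (patch : String) : Option Int :=
  pvGoA (PySem.Str.splitlines patch) none 0 0 none

-- ===== PORT B =====

-- Source B's _parse_header: new_start, or none on ValueError/IndexError
def pvParseB (raw : String) : Option Int :=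
  match (PySem.Str.split? (PySem.Str.strip (((PySem.Str.split? raw "@@").getD []).getD 1 "")) " ").getD [] with
  | oldChunk :: newChunk :: _ =>
    match PySem.Int.ofStr? (PySem.Str.slice (((PySem.Str.split? oldChunk ",").getD []).getD 0 "") (some 1) none),
          PySem.Int.ofStr? (PySem.Str.slice (((PySem.Str.split? newChunk ",").getD []).getD 0 "") (some 1) none) with
    | some _, some ns => some ns
    | _, _ => none
  | _ => none

-- hunks[-1][1].append(raw)
def pvAddToLast : List (Int × List String) → String → List (Int × List String)
  | [], _ => []
  | [(c, b)], raw => [(c, b ++ [raw])]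
  | h :: t, raw => h :: pvAddToLast t raw

-- first pass of Source B: build (hunks, fallback)
def pvGroupStep (st : List (Int × List String) × Option Int) (raw : String) :
    List (Int × List String) × Option Int :=
  if PySem.Str.startswith raw "@@" then
    match pvParseB raw with
    | some ns => (st.1 ++ [(ns, [])], pvOrOpt st.2 (some ns))
    | none => st
  else (pvAddToLast st.1 raw, st.2)

-- second pass of Source B: scan one hunk body with a local cursor
def pvScanHunk : Int → List String → Option Int
  | _, [] => none
  | cur, line :: rest =>
    if PySem.Str.startswith line "+" then some cur
    else pvScanHunk (if PySem.Str.startswith line "-" then cur else cur + 1) rest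

def pvScanHunks : List (Int × List String) → Option Int → Option Int
  | [], fb => fb
  | (s, b) :: hs, fb =>
    match pvScanHunk s b with
    | some n => some n
    | none => pvScanHunks hs fb

def find_first_added_line_alt (patch : String) : Option Int :=
  let st := (PySem.Str.splitlines patch).foldl pvGroupStep ([(0, [])], none)
  pvScanHunks st.1 st.2

-- ===== PRECONDITION & SPEC =====
def Spec_find_first_added_line (patch : String) (out : Option Int) : Prop := out = find_first_added_line_alt patch
instance (patch : String) (out : Option Int) : Decidable (Spec_find_first_added_line patch out) := by unfold Spec_find_first_added_line; infer_instance

-- ===== CLAIM (what is proved, stated in full; the proofs are below) =====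
def Claim_equal_find_first_added_line : Prop := ∀ (patch : String), Dom_find_first_added_line patch → Spec_find_first_added_line patch (find_first_added_line patch)

-- ===== LEMMAS AND PROOFS =====

-- hunk scan with the final cursor exposed (proof-side view of pvScanHunk)
def pvScanHunkC : Int → List String → Option Int × Int
  | cur, [] => (none, cur)
  | cur, line :: rest =>
    if PySem.Str.startswith line "+" then (some cur, cur)
    else pvScanHunkC (if PySem.Str.startswith line "-" then cur else cur + 1) rest

theorem pvScanHunk_eq_C (b : List String) : ∀ c, pvScanHunk c b = (pvScanHunkC c b).1 := by
  induction b with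
  | nil => intro c; rfl
  | cons l rest ih =>
    intro c
    simp only [pvScanHunk, pvScanHunkC]
    by_cases h1 : PySem.Str.startswith l "+" = true
    · rw [if_pos h1, if_pos h1]
    · rw [if_neg h1, if_neg h1]; exact ih _

theorem pvScanHunkC_append_none : ∀ (acc : List String) (c cur : Int) (more : List String),
    pvScanHunkC c acc = (none, cur) → pvScanHunkC c (acc ++ more) = pvScanHunkC cur more := by
  intro acc
  induction acc with
  | nil =>
    intro c cur more h
    simp only [pvScanHunkC, Prod.mk.injEq] at h
    rw [List.nil_append, h.2]
  | cons l rest ih =>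
    intro c cur more h
    simp only [pvScanHunkC, List.cons_append] at h ⊢
    by_cases h1 : PySem.Str.startswith l "+" = true
    · rw [if_pos h1] at h; simp at h
    · rw [if_neg h1] at h ⊢; exact ih _ _ _ h

theorem pvScanHunkC_append_some : ∀ (acc : List String) (c r : Int) (more : List String),
    (pvScanHunkC c acc).1 = some r → (pvScanHunkC c (acc ++ more)).1 = some r := by
  intro acc
  induction acc with
  | nil => intro c r more h; simp [pvScanHunkC] at h
  | cons l rest ih =>
    intro c r more h
    simp only [pvScanHunkC, List.cons_append] at h ⊢
    by_cases h1 : PySem.Str.startswith l "+" = true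
    · rw [if_pos h1] at h ⊢; exact h
    · rw [if_neg h1] at h ⊢; exact ih _ _ _ h

theorem pvAddToLast_append (hs : List (Int × List String)) (c : Int) (b : List String) (raw : String) :
    pvAddToLast (hs ++ [(c, b)]) raw = hs ++ [(c, b ++ [raw])] := by
  induction hs with
  | nil => rfl
  | cons h t ih =>
    cases t with
    | nil => simp [pvAddToLast]
    | cons h' t' => simpa [pvAddToLast] using ih

theorem pvScanHunks_append (hs : List (Int × List String)) :
    ∀ t fb, pvScanHunks (hs ++ t) fb = pvScanHunks hs (pvScanHunks t fb) := by
  induction hs with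
  | nil => intro t fb; rfl
  | cons h hs ih =>
    intro t fb
    obtain ⟨s, b⟩ := h
    simp only [List.cons_append, pvScanHunks]
    cases pvScanHunk s b <;> simp [ih]

-- parse agreement between A's inline header parse and Source B's helper
theorem pvParseB_eq (raw : String) : pvParseB raw = (pvParseHeaderA raw).map Prod.snd := by
  unfold pvParseB pvParseHeaderA
  generalize (PySem.Str.split? (PySem.Str.strip (((PySem.Str.split? raw "@@").getD []).getD 1 "")) " ").getD [] = parts
  cases parts with
  | nil => rfl
  | cons o t =>
    cases t with
    | nil => rfl
    | cons n t' =>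
      dsimp only
      generalize PySem.Int.ofStr? (PySem.Str.slice (((PySem.Str.split? o ",").getD []).getD 0 "") (some 1) none) = a
      generalize PySem.Int.ofStr? (PySem.Str.slice (((PySem.Str.split? n ",").getD []).getD 0 "") (some 1) none) = b
      cases a <;> cases b <;> rfl

-- once some hunk already yields, later grouped lines cannot change the answer
theorem pvAddToLast_some : ∀ (hs : List (Int × List String)) (r : Int) (raw : String),
    (∀ fb', pvScanHunks hs fb' = some r) →
    ∀ fb', pvScanHunks (pvAddToLast hs raw) fb' = some r := by
  intro hs
  induction hs with
  | nil =>
    intro r raw h fb'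
    exact absurd (h none) (by simp [pvScanHunks])
  | cons hd t ih =>
    intro r raw hyp fb'
    obtain ⟨s, b⟩ := hd
    cases t with
    | nil =>
      have h0 := hyp none
      simp only [pvScanHunks] at h0
      cases hsb : pvScanHunk s b with
      | none => simp only [hsb] at h0; exact (Option.some_ne_none r h0.symm).elim
      | some n =>
        simp only [hsb] at h0
        have hfound : pvScanHunk s (b ++ [raw]) = some n := by
          rw [pvScanHunk_eq_C]
          refine pvScanHunkC_append_some b s n [raw] ?_
          rw [← pvScanHunk_eq_C]; exact hsb
        simp only [pvAddToLast, pvScanHunks, hfound]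
        exact h0
    | cons hd' t' =>
      simp only [pvAddToLast, pvScanHunks]
      cases hsb : pvScanHunk s b with
      | some n =>
        have h0 := hyp none
        simp only [pvScanHunks, hsb] at h0
        exact h0
      | none =>
        have hyp' : ∀ fb'', pvScanHunks (hd' :: t') fb'' = some r := by
          intro fb''
          have h0 := hyp fb''
          simp only [pvScanHunks, hsb] at h0
          exact h0
        exact ih r raw hyp' fb'

theorem pvAbsorb : ∀ (lines : List String) (hs : List (Int × List String)) (fb : Option Int) (r : Int),
    (∀ fb', pvScanHunks hs fb' = some r) →
    pvScanHunks (lines.foldl pvGroupStep (hs, fb)).1 (lines.foldl pvGroupStep (hs, fb)).2 = some r := by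
  intro lines
  induction lines with
  | nil => intro hs fb r h; exact h fb
  | cons raw rest ih =>
    intro hs fb r h
    rw [List.foldl_cons]
    by_cases hdr : PySem.Str.startswith raw "@@" = true
    · cases hp : pvParseB raw with
      | some ns =>
        have hstep : pvGroupStep (hs, fb) raw = (hs ++ [(ns, [])], pvOrOpt fb (some ns)) := by
          unfold pvGroupStep; rw [if_pos hdr, hp]
        rw [hstep]
        refine ih _ _ r ?_
        intro fb'
        rw [pvScanHunks_append]
        exact h _
      | none =>
        have hstep : pvGroupStep (hs, fb) raw = (hs, fb) := by
          unfold pvGroupStep; rw [if_pos hdr, hp]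
        rw [hstep]
        exact ih _ _ r h
    · have hstep : pvGroupStep (hs, fb) raw = (pvAddToLast hs raw, fb) := by
        unfold pvGroupStep; rw [if_neg hdr]
      rw [hstep]
      exact ih _ _ r (pvAddToLast_some hs r raw h)

-- all hunks in a prefix yield none: scanning skips them
theorem pvScanHunks_skip : ∀ (hs : List (Int × List String)) (t : List (Int × List String)) (fb : Option Int),
    (∀ p ∈ hs, pvScanHunk p.1 p.2 = none) →
    pvScanHunks (hs ++ t) fb = pvScanHunks t fb := by
  intro hs
  induction hs with
  | nil => intro t fb _; rfl
  | cons h hs ih =>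
    intro t fb hall
    obtain ⟨s, b⟩ := h
    simp only [List.cons_append, pvScanHunks]
    rw [hall (s, b) (by simp)]
    exact ih t fb (fun p hp => hall p (by simp [hp]))

-- MAIN INVARIANT: B's grouped scan from an open hunk agrees with A's cumulative loop
theorem pvMain : ∀ (lines : List String) (hs : List (Int × List String)) (c : Int)
    (acc : List String) (cur : Int) (fb : Option Int) (old : Int),
    (∀ p ∈ hs, pvScanHunk p.1 p.2 = none) →
    pvScanHunkC c acc = (none, cur) →
    pvScanHunks (lines.foldl pvGroupStep (hs ++ [(c, acc)], fb)).1
        (lines.foldl pvGroupStep (hs ++ [(c, acc)], fb)).2 = pvGoA lines none old cur fb := by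
  intro lines
  induction lines with
  | nil =>
    intro hs c acc cur fb old hall hacc
    rw [List.foldl_nil, pvScanHunks_skip hs [(c, acc)] fb hall]
    have hskip : pvScanHunk c acc = none := by rw [pvScanHunk_eq_C, hacc]
    simp only [pvScanHunks, hskip]
    rfl
  | cons raw rest ih =>
    intro hs c acc cur fb old hall hacc
    have hskip : pvScanHunk c acc = none := by rw [pvScanHunk_eq_C, hacc]
    rw [List.foldl_cons]
    by_cases hdr : PySem.Str.startswith raw "@@" = true
    · have hPB := pvParseB_eq raw
      cases hp : pvParseHeaderA raw with
      | some p =>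
        obtain ⟨os, ns⟩ := p
        rw [hp] at hPB
        have hstep : pvGroupStep (hs ++ [(c, acc)], fb) raw
            = ((hs ++ [(c, acc)]) ++ [(ns, [])], pvOrOpt fb (some ns)) := by
          unfold pvGroupStep; rw [if_pos hdr, hPB]; rfl
        have hA : pvGoA (raw :: rest) none old cur fb
            = pvGoA rest none os ns (pvOrOpt fb (some ns)) := by
          conv_lhs => unfold pvGoA
          rw [if_pos hdr, hp]
        rw [hstep, hA]
        have hall' : ∀ q ∈ (hs ++ [(c, acc)]), pvScanHunk q.1 q.2 = none := by
          intro q hq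
          rcases List.mem_append.mp hq with h1 | h1
          · exact hall q h1
          · simp only [List.mem_singleton] at h1; subst h1; exact hskip
        exact ih (hs ++ [(c, acc)]) ns [] ns (pvOrOpt fb (some ns)) os hall' rfl
      | none =>
        rw [hp] at hPB
        have hstep : pvGroupStep (hs ++ [(c, acc)], fb) raw = (hs ++ [(c, acc)], fb) := by
          unfold pvGroupStep; rw [if_pos hdr, hPB]; rfl
        have hA : pvGoA (raw :: rest) none old cur fb = pvGoA rest none old cur fb := by
          conv_lhs => unfold pvGoA
          rw [if_pos hdr, hp]
        rw [hstep, hA]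
        exact ih hs c acc cur fb old hall hacc
    · by_cases hplus : PySem.Str.startswith raw "+" = true
      · have hstep : pvGroupStep (hs ++ [(c, acc)], fb) raw
            = (hs ++ [(c, acc ++ [raw])], fb) := by
          unfold pvGroupStep; rw [if_neg hdr, pvAddToLast_append]
        have hA : pvGoA (raw :: rest) none old cur fb = some cur := by
          conv_lhs => unfold pvGoA
          rw [if_neg hdr, if_pos hplus]
          rfl
        rw [hstep, hA]
        have hfound : pvScanHunk c (acc ++ [raw]) = some cur := by
          rw [pvScanHunk_eq_C, pvScanHunkC_append_none acc c cur [raw] hacc]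
          simp only [pvScanHunkC]
          rw [if_pos hplus]
        have habs : ∀ fb', pvScanHunks (hs ++ [(c, acc ++ [raw])]) fb' = some cur := by
          intro fb'
          rw [pvScanHunks_skip hs [(c, acc ++ [raw])] fb' hall]
          simp only [pvScanHunks, hfound]
        exact pvAbsorb rest (hs ++ [(c, acc ++ [raw])]) fb cur habs
      · have hstep : pvGroupStep (hs ++ [(c, acc)], fb) raw
            = (hs ++ [(c, acc ++ [raw])], fb) := by
          unfold pvGroupStep; rw [if_neg hdr, pvAddToLast_append]
        rw [hstep]
        by_cases hminus : PySem.Str.startswith raw "-" = true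
        · have hA : pvGoA (raw :: rest) none old cur fb = pvGoA rest none (old + 1) cur fb := by
            conv_lhs => unfold pvGoA
            rw [if_neg hdr, if_neg hplus, if_pos hminus]
          rw [hA]
          have hacc' : pvScanHunkC c (acc ++ [raw]) = (none, cur) := by
            rw [pvScanHunkC_append_none acc c cur [raw] hacc]
            simp only [pvScanHunkC]
            rw [if_neg hplus, if_pos hminus]
          exact ih hs c (acc ++ [raw]) cur fb (old + 1) hall hacc'
        · have hA : pvGoA (raw :: rest) none old cur fb
              = pvGoA rest none (old + 1) (cur + 1) fb := by
            conv_lhs => unfold pvGoA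
            rw [if_neg hdr, if_neg hplus, if_neg hminus]
          rw [hA]
          have hacc' : pvScanHunkC c (acc ++ [raw]) = (none, cur + 1) := by
            rw [pvScanHunkC_append_none acc c cur [raw] hacc]
            simp only [pvScanHunkC]
            rw [if_neg hplus, if_neg hminus]
          exact ih hs c (acc ++ [raw]) (cur + 1) fb (old + 1) hall hacc'

-- ===== VERDICT (by name: the statement is the Claim_ definition above) =====
theorem find_first_added_line_spec : Claim_equal_find_first_added_line := by
  intro patch _
  unfold Spec_find_first_added_line find_first_added_line find_first_added_line_alt
  exact (pvMain (PySem.Str.splitlines patch) [] 0 [] 0 none 0 (by simp) rfl).symm
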